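-- pv_equiv track=rewrite | github.com/csuchaney-png/vitalview_app | app_vitalview.py | _sectionize
-- ===== SOURCE A (Python) =====
-- def _sectionize(text: str) -> dict:
--     sections, current = {}, None
--     for line in (text or "").splitlines():
--         if line.strip() and not line.startswith(" "):
--             if any(h in line for h in ["Executive Summary","Statement of Need","Recent Indicator Trends",
--                                        "Community Voice","Target Population","Proposed Strategies",
--                                        "Partnerships","SMART Outcomes","Implementation Timeline",
--                                        "Evaluation & Equity Monitoring","Budget & Sustainability"]):
--                 current = line.strip(); sections[current] = []; continue
--         if current: sections[current].append(line)
--     return {k:"\n".join(v).strip() for k,v in sections.items()}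
-- ===== SOURCE B (Python) =====
-- HEADERS = ["Executive Summary","Statement of Need","Recent Indicator Trends",
--            "Community Voice","Target Population","Proposed Strategies",
--            "Partnerships","SMART Outcomes","Implementation Timeline",
--            "Evaluation & Equity Monitoring","Budget & Sustainability"]
--
-- def _sectionize(text: str) -> dict:
--     lines = (text or "").splitlines()
--     idx = [i for i, l in enumerate(lines)
--            if l.strip() and not l.startswith(" ") and any(h in l for h in HEADERS)]
--     sections = {}
--     for i, j in zip(idx, idx[1:] + [len(lines)]):
--         sections[lines[i].strip()] = "\n".join(lines[i + 1:j]).strip()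
--     return sections
-- ===== Notes on version B (the rewrite author's own statement) =====
-- stated objective: alternative
-- what changed: B first builds a table of header-line indices, then slices the line list between consecutive header positions and assigns each section in one step, instead of A's line-by-line state machine that appends to the current section while scanning.
import Mathlib
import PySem

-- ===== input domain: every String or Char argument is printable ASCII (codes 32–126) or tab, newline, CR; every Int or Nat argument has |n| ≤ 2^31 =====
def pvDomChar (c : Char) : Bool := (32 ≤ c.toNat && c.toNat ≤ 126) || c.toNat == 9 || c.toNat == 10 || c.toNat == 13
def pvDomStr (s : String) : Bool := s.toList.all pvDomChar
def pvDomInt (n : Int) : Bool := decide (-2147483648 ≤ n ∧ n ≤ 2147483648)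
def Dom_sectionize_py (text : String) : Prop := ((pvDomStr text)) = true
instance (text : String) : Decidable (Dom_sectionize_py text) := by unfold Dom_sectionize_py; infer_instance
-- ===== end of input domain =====

-- B re-implements A by building a header-index table and slicing between consecutive
-- header positions, instead of A's running-state line scan; same results, same cost.

-- the header list shared by both Pythons
def pvHeaders : List String :=
  ["Executive Summary","Statement of Need","Recent Indicator Trends",
   "Community Voice","Target Population","Proposed Strategies",
   "Partnerships","SMART Outcomes","Implementation Timeline",
   "Evaluation & Equity Monitoring","Budget & Sustainability"]

-- ===== PORT A =====
-- loop body of A: nested ifs in the Python's order; `current` (None or a nonempty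
-- stripped header line) is Option String — `if current:` is the `some` match, exact
-- because a stored current is a stripped line the guard proved nonempty.
-- sections[current].append(line) is Dict.modify (current always present).
def pvStepA (st : PySem.Dict String (List String) × Option String) (line : String) :
    PySem.Dict String (List String) × Option String :=
  if PySem.Str.strip line ≠ "" ∧ PySem.Str.startswith line " " = false then
    if pvHeaders.any (fun h => PySem.Str.isIn h line) then
      (st.1.insert (PySem.Str.strip line) [], some (PySem.Str.strip line))
    else
      match st.2 with
      | some c => (st.1.modify c [] (fun v => v ++ [line]), st.2)
      | none => st
  else
    match st.2 with
    | some c => (st.1.modify c [] (fun v => v ++ [line]), st.2)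
    | none => st

def sectionize_py (text : String) : List (String × String) :=
  let lines := PySem.Str.splitlines (if text == "" then "" else text)  -- (text or "")
  let res := lines.foldl pvStepA (PySem.Dict.empty, none)
  res.1.items.map (fun kv => (kv.1, PySem.Str.strip (PySem.Str.join "\n" kv.2)))

-- ===== PORT B =====
def pvIsHeader (line : String) : Bool :=
  PySem.Str.strip line ≠ "" && !PySem.Str.startswith line " " &&
    pvHeaders.any (fun h => PySem.Str.isIn h line)

-- lines[i] is ported with pyGetD: every i in idx is a valid index by construction,
-- so the default is never read and the port is exact.
def sectionize_py_alt (text : String) : List (String × String) :=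
  let lines := PySem.Str.splitlines (if text == "" then "" else text)  -- (text or "")
  let idx : List Int :=
    ((PySem.List.enumerate lines 0).filter (fun p => pvIsHeader p.2)).map (·.1)
  let pairs := idx.zip (PySem.List.slice idx (some 1) none ++ [(lines.length : Int)])
  (pairs.foldl (fun d p =>
      d.insert (PySem.Str.strip (PySem.List.pyGetD lines p.1 ""))
        (PySem.Str.strip (PySem.Str.join "\n"
          (PySem.List.slice lines (some (p.1 + 1)) (some p.2))))) PySem.Dict.empty).items

-- ===== PRECONDITION & SPEC =====
def Spec_sectionize_py (text : String) (out : List (String × String)) : Prop := out = sectionize_py_alt text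
instance (text : String) (out : List (String × String)) : Decidable (Spec_sectionize_py text out) := by unfold Spec_sectionize_py; infer_instance

-- ===== CLAIM (what is proved, stated in full; the proofs are below) =====
def Claim_equal_sectionize_py : Prop := ∀ (text : String), Dom_sectionize_py text → Spec_sectionize_py text (sectionize_py text)

-- ===== LEMMAS AND PROOFS =====

-- the common "list of (section name, body lines)" both programs compute
def pvG : List String → List (String × List String)
  | [] => []
  | l :: ls =>
      if pvIsHeader l then
        (PySem.Str.strip l, ls.takeWhile (fun x => !pvIsHeader x)) :: pvG ls
      else pvG ls

def pvInsL (d : PySem.Dict String (List String)) (p : String × List String) :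
    PySem.Dict String (List String) := d.insert p.1 p.2

def pvInsS (d : PySem.Dict String String) (p : String × String) :
    PySem.Dict String String := d.insert p.1 p.2

def pvg (kv : String × List String) : String × String :=
  (kv.1, PySem.Str.strip (PySem.Str.join "\n" kv.2))

-- A's header test, as the conjunction of the two Python conditions
theorem pvIsHeader_iff (line : String) :
    pvIsHeader line = true ↔
      (PySem.Str.strip line ≠ "" ∧ PySem.Str.startswith line " " = false) ∧
        (pvHeaders.any (fun h => PySem.Str.isIn h line)) = true := by
  unfold pvIsHeader
  cases hw : PySem.Str.startswith line " " <;>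
    cases ha : pvHeaders.any (fun h => PySem.Str.isIn h line) <;>
      by_cases hs : PySem.Str.strip line = "" <;> simp_all

-- A's loop body as a single test on pvIsHeader
theorem pvStepA_eq (st : PySem.Dict String (List String) × Option String) (line : String) :
    pvStepA st line =
      if pvIsHeader line then
        (st.1.insert (PySem.Str.strip line) [], some (PySem.Str.strip line))
      else
        match st.2 with
        | some c => (st.1.modify c [] (fun v => v ++ [line]), st.2)
        | none => st := by
  unfold pvStepA
  by_cases hh : pvIsHeader line
  · obtain ⟨h1, h2⟩ := (pvIsHeader_iff line).mp hh
    rw [if_pos hh, if_pos h1, if_pos h2]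
  · rw [if_neg hh]
    by_cases h1 : PySem.Str.strip line ≠ "" ∧ PySem.Str.startswith line " " = false
    · rw [if_pos h1, if_neg (fun h2 => hh ((pvIsHeader_iff line).mpr ⟨h1, h2⟩))]
    · rw [if_neg h1]

theorem pvModify_insert (d : PySem.Dict String (List String)) (k : String)
    (acc : List String) (l : String) :
    (d.insert k acc).modify k [] (fun v => v ++ [l]) = d.insert k (acc ++ [l]) := by
  simp [PySem.Dict.modify, PySem.Dict.getD_insert_self, PySem.Dict.insert_insert_self]

theorem pvRunSome (ls : List String) (d : PySem.Dict String (List String))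
    (k : String) (acc : List String) :
    (ls.foldl pvStepA (d.insert k acc, some k)).1 =
      (pvG ls).foldl pvInsL (d.insert k (acc ++ ls.takeWhile (fun x => !pvIsHeader x))) := by
  induction ls generalizing d k acc with
  | nil => simp [pvG]
  | cons l ls ih =>
    rw [List.foldl_cons, pvStepA_eq]
    by_cases h : pvIsHeader l
    · rw [if_pos h]
      have hih := ih (d.insert k acc) (PySem.Str.strip l) []
      simp only [List.nil_append] at hih
      rw [hih]
      simp [pvG, h, pvInsL]
    · rw [if_neg h]
      simp only [pvModify_insert]
      rw [ih d k (acc ++ [l])]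
      simp [pvG, h]
  
theorem pvRunNone (ls : List String) (d : PySem.Dict String (List String)) :
    (ls.foldl pvStepA (d, none)).1 = (pvG ls).foldl pvInsL d := by
  induction ls generalizing d with
  | nil => rfl
  | cons l ls ih =>
    rw [List.foldl_cons, pvStepA_eq]
    by_cases h : pvIsHeader l
    · rw [if_pos h]
      have hrs := pvRunSome ls d (PySem.Str.strip l) []
      simp only [List.nil_append] at hrs
      rw [hrs]
      simp [pvG, h, pvInsL]
    · rw [if_neg h]
      rw [ih d]
      simp [pvG, h]

-- the dict with values mapped through pvg's second component
def pvMd (d : PySem.Dict String (List String)) : PySem.Dict String String :=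
  PySem.Dict.mk (d.items.map pvg)

theorem pvMd_contains (d : PySem.Dict String (List String)) (k : String) :
    (pvMd d).contains k = d.contains k := by
  simp only [pvMd, PySem.Dict.contains, List.any_map]
  rw [show ((fun p : String × String => p.1 == k) ∘ pvg) =
    (fun p : String × List String => p.1 == k) from funext fun p => rfl]

theorem pvMd_insert (d : PySem.Dict String (List String)) (k : String) (v : List String) :
    pvMd (d.insert k v) = (pvMd d).insert k (PySem.Str.strip (PySem.Str.join "\n" v)) := by
  unfold PySem.Dict.insert
  rw [pvMd_contains]
  by_cases h : d.contains k = true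
  · rw [if_pos h, if_pos h]
    unfold pvMd
    simp only [List.map_map]
    congr 1
    apply List.map_congr_left
    intro p _
    by_cases hp : p.1 = k
    · simp [pvg, hp]
    · simp [pvg, hp]
  · rw [if_neg h, if_neg h]
    unfold pvMd
    simp [pvg]

theorem pvMd_foldl (gs : List (String × List String)) (d : PySem.Dict String (List String)) :
    pvMd (gs.foldl pvInsL d) = (gs.map pvg).foldl pvInsS (pvMd d) := by
  induction gs generalizing d with
  | nil => rfl
  | cons p gs ih =>
    rw [List.foldl_cons, List.map_cons, List.foldl_cons, ih]
    congr 1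
    exact pvMd_insert d p.1 p.2

-- B-side: the header-index table, in Nat form
def pvIdxN : List String → List Nat
  | [] => []
  | l :: ls => if pvIsHeader l then 0 :: (pvIdxN ls).map (· + 1) else (pvIdxN ls).map (· + 1)

def pvPairsN (ls : List String) : List (Nat × Nat) :=
  (pvIdxN ls).zip ((pvIdxN ls).drop 1 ++ [ls.length])

def pvKV (ls : List String) (p : Nat × Nat) : String × List String :=
  (PySem.Str.strip (ls.getD p.1 ""), (ls.drop (p.1 + 1)).take (p.2 - (p.1 + 1)))

theorem pvEnum (ls : List String) (s : Int) :
    ((PySem.List.enumerate ls s).filter (fun p => pvIsHeader p.2)).map (·.1) =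
      (pvIdxN ls).map (fun n : Nat => s + (n : Int)) := by
  induction ls generalizing s with
  | nil => rfl
  | cons l ls ih =>
    rw [PySem.List.enumerate_cons, List.filter_cons]
    by_cases h : pvIsHeader l
    · rw [if_pos (by simpa using h), List.map_cons]
      unfold pvIdxN
      rw [if_pos h, List.map_cons, ih (s + 1), List.map_map]
      congr 1
      · simp
      · apply List.map_congr_left
        intro a _
        simp only [Function.comp_apply]
        push_cast
        ring
    · rw [if_neg (by simp [h])]
      unfold pvIdxN
      rw [if_neg h, ih (s + 1), List.map_map]
      apply List.map_congr_left
      intro a _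
      simp only [Function.comp_apply]
      push_cast
      ring

theorem pvZipShift (m : List Nat) (n : Nat) :
    (m.map (· + 1)).zip ((m.map (· + 1)).drop 1 ++ [n + 1]) =
      (m.zip (m.drop 1 ++ [n])).map (fun p => (p.1 + 1, p.2 + 1)) := by
  rw [← List.map_drop, show ([n + 1] : List Nat) = [n].map (· + 1) from rfl,
    ← List.map_append, List.zip_map]
  rfl

theorem pvKV_shift (l : String) (ls : List String) (p : Nat × Nat) :
    pvKV (l :: ls) (p.1 + 1, p.2 + 1) = pvKV ls p := by
  simp [pvKV, Nat.succ_sub_succ]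

theorem pvIdxN_nil_takeWhile (ls : List String) (h : pvIdxN ls = []) :
    ls.takeWhile (fun x => !pvIsHeader x) = ls := by
  induction ls with
  | nil => rfl
  | cons l ls ih =>
    unfold pvIdxN at h
    by_cases hl : pvIsHeader l
    · rw [if_pos hl] at h; exact absurd h (by simp)
    · rw [if_neg hl] at h
      simp [hl, ih (List.map_eq_nil_iff.mp h)]

theorem pvIdxN_nil_pvG (ls : List String) (h : pvIdxN ls = []) : pvG ls = [] := by
  induction ls with
  | nil => rfl
  | cons l ls ih =>
    unfold pvIdxN at h
    by_cases hl : pvIsHeader l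
    · rw [if_pos hl] at h; exact absurd h (by simp)
    · rw [if_neg hl] at h
      simp [pvG, hl, ih (List.map_eq_nil_iff.mp h)]

theorem pvIdxN_head_take (ls : List String) (i : Nat) (m' : List Nat)
    (h : pvIdxN ls = i :: m') :
    ls.take i = ls.takeWhile (fun x => !pvIsHeader x) := by
  induction ls generalizing i m' with
  | nil => simp [pvIdxN] at h
  | cons l ls ih =>
    unfold pvIdxN at h
    by_cases hl : pvIsHeader l
    · rw [if_pos hl] at h
      obtain ⟨hi, -⟩ := List.cons.injEq .. ▸ (h : _)
      cases h
      simp [hl]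
    · rw [if_neg hl] at h
      cases hm : pvIdxN ls with
      | nil => rw [hm] at h; simp at h
      | cons i' m'' =>
        rw [hm] at h
        simp only [List.map_cons] at h
        cases h
        simp [hl, ih i' m'' hm]

theorem pvB_main (ls : List String) : (pvPairsN ls).map (pvKV ls) = pvG ls := by
  induction ls with
  | nil => rfl
  | cons l ls ih =>
    by_cases h : pvIsHeader l
    · cases hm : pvIdxN ls with
      | nil =>
        unfold pvPairsN pvIdxN
        rw [if_pos h, hm]
        simp only [List.map_nil, List.drop, List.nil_append, List.zip_cons_cons,
          List.zip_nil_right, List.map_cons, List.map_nil, List.length_cons]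
        unfold pvG
        rw [if_pos h, pvIdxN_nil_pvG ls hm, pvIdxN_nil_takeWhile ls hm]
        simp [pvKV]
      | cons i m' =>
        unfold pvPairsN pvIdxN
        rw [if_pos h, hm]
        simp only [List.map_cons, List.length_cons, List.drop_succ_cons, List.drop_zero,
          List.zip_cons_cons, List.map_cons, List.cons_append]
        unfold pvG
        rw [if_pos h]
        congr 1
        · show pvKV (l :: ls) (0, i + 1) = _
          simp only [pvKV, List.getD_cons_zero, Nat.zero_add, List.drop_succ_cons,
            List.drop_zero, Nat.add_sub_cancel]
          rw [pvIdxN_head_take ls i m' hm]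
        · have hshift := pvZipShift (pvIdxN ls) ls.length
          rw [hm] at hshift
          simp only [List.map_cons, List.drop_succ_cons, List.drop_zero] at hshift
          rw [hshift, List.map_map]
          rw [show (pvKV (l :: ls)) ∘ (fun p : Nat × Nat => (p.1 + 1, p.2 + 1)) = pvKV ls from
            funext fun p => pvKV_shift l ls p]
          have hpp : pvPairsN ls = (i :: m').zip (m' ++ [ls.length]) := by
            unfold pvPairsN
            rw [hm]
            simp
          rw [← hpp, ih]
    · unfold pvPairsN pvIdxN
      rw [if_neg h]
      simp only [List.length_cons]
      rw [pvZipShift (pvIdxN ls) ls.length, List.map_map]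
      rw [show (pvKV (l :: ls)) ∘ (fun p : Nat × Nat => (p.1 + 1, p.2 + 1)) = pvKV ls from
        funext fun p => pvKV_shift l ls p]
      unfold pvG
      rw [if_neg h]
      exact ih

theorem pvStepB (lines : List String) (d : PySem.Dict String String) (p : Nat × Nat) :
    d.insert
        (PySem.Str.strip (PySem.List.pyGetD lines
          ((Prod.map (fun n : Nat => (n : Int)) (fun n : Nat => (n : Int)) p).1) ""))
        (PySem.Str.strip (PySem.Str.join "\n"
          (PySem.List.slice lines
            (some ((Prod.map (fun n : Nat => (n : Int)) (fun n : Nat => (n : Int)) p).1 + 1))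
            (some ((Prod.map (fun n : Nat => (n : Int)) (fun n : Nat => (n : Int)) p).2))))) =
      pvInsS d (pvg (pvKV lines p)) := by
  obtain ⟨i, j⟩ := p
  simp only [Prod.map, PySem.List.pyGetD_natCast]
  rw [show ((i : Int) + 1) = ((i + 1 : Nat) : Int) by push_cast; ring,
    PySem.List.slice_natCast]
  rfl

theorem pvFoldEq (lines : List String) (ps : List (Nat × Nat)) (d : PySem.Dict String String) :
    (((ps.map (pvKV lines)).map pvg).foldl pvInsS d) =
      ((ps.map (Prod.map (fun n : Nat => (n : Int)) (fun n : Nat => (n : Int)))).foldl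
        (fun d (p : Int × Int) =>
          d.insert (PySem.Str.strip (PySem.List.pyGetD lines p.1 ""))
            (PySem.Str.strip (PySem.Str.join "\n"
              (PySem.List.slice lines (some (p.1 + 1)) (some p.2))))) d) := by
  induction ps generalizing d with
  | nil => rfl
  | cons p ps ih =>
    simp only [List.map_cons, List.foldl_cons]
    rw [← ih, pvStepB lines d p]

-- ===== VERDICT (by name: the statement is the Claim_ definition above) =====
theorem sectionize_py_spec : Claim_equal_sectionize_py := by
  intro text _
  unfold Spec_sectionize_py sectionize_py sectionize_py_alt
  dsimp only
  set lines := PySem.Str.splitlines (if text == "" then "" else text) with hlines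
  -- A side: the running scan computes the fold of pvG, then map the values
  rw [pvRunNone lines PySem.Dict.empty]
  have hA : ((pvG lines).foldl pvInsL PySem.Dict.empty).items.map
        (fun kv => (kv.1, PySem.Str.strip (PySem.Str.join "\n" kv.2))) =
      (((pvG lines).map pvg).foldl pvInsS PySem.Dict.empty).items := by
    have h1 := pvMd_foldl (pvG lines) PySem.Dict.empty
    have h2 : pvMd (PySem.Dict.empty : PySem.Dict String (List String)) = PySem.Dict.empty := rfl
    rw [h2] at h1
    calc ((pvG lines).foldl pvInsL PySem.Dict.empty).items.map
          (fun kv => (kv.1, PySem.Str.strip (PySem.Str.join "\n" kv.2)))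
        = (pvMd ((pvG lines).foldl pvInsL PySem.Dict.empty)).items := rfl
      _ = _ := by rw [h1]
  rw [hA]
  -- B side: index table, sentinel and slices reduce to pvPairsN/pvKV
  have hidx : ((PySem.List.enumerate lines 0).filter (fun p => pvIsHeader p.2)).map (·.1) =
      (pvIdxN lines).map (fun n : Nat => (n : Int)) := by
    rw [pvEnum lines 0]
    apply List.map_congr_left
    intro a _
    ring
  rw [hidx, PySem.List.slice_from_one, ← List.drop_one, ← List.map_drop,
    show ([(lines.length : Int)] : List Int) =
      ([lines.length].map (fun n : Nat => (n : Int))) from rfl,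
    ← List.map_append, List.zip_map]
  rw [← pvB_main lines]
  exact congrArg PySem.Dict.items (pvFoldEq lines (pvPairsN lines) PySem.Dict.empty)
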